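-- pv_equiv track=rewrite | github.com/djLeeeee/Algorithm_study | 0303/eunminbb/pgm_recommend_newid/s1.py | solution
-- ===== SOURCE A (Python) =====
-- def dot(lst):
--     for i in range(len(lst)-1):
--         if lst[i] == '.':
--             if lst[i+1] == '.':
--                 lst.pop(i+1)
--                 return dot(lst)
--     return
--
-- def solution(new_id):
--
--     new_id = new_id.lower()
--     new_lst = list(new_id)
--     # 2.
--     a = 0
--     while a < len(new_lst):
--         if new_lst[a].isalpha() or new_lst[a].isdigit() or new_lst[a] in ['-', '_', '.']:
--             a += 1
--         else:
--             new_lst.pop(a)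
--     # 3.
--     dot(new_lst)
--
--     # 4.
--     if len(new_lst) >= 2:
--         for k in [0, -1]:
--             if new_lst[k] == '.':
--                 new_lst.pop(k)
--     elif len(new_lst) == 1:
--         if new_lst[0] == '.':
--             new_lst.pop()
--
--     if not new_lst:
--         new_lst.append('a')
--
--     if len(new_lst) >= 16:
--         new_lst = new_lst[:15]
--         if new_lst[-1] == '.':
--             new_lst.pop()
--
--     elif len(new_lst) <= 2:
--         while len(new_lst) < 3:
--             new_lst.append(new_lst[-1])
--     # elif len(new_lst) == 2:
--     #     new_lst.append(new_lst[-1])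
--     # elif len(new_lst) == 1:
--     #     new_lst = new_lst*3
--
--     answer = ''.join(new_lst)
--     return answer
-- ===== SOURCE B (Python) =====
-- def solution(new_id):
--     # one pass: lowercase, keep allowed chars, and collapse consecutive dots on the fly
--     out = []
--     for c in new_id.lower():
--         if c.isalpha() or c.isdigit() or c in '-_':
--             out.append(c)
--         elif c == '.' and (not out or out[-1] != '.'):
--             out.append(c)
--     s = ''.join(out).strip('.')
--     if not s:
--         s = 'a'
--     if len(s) >= 16:
--         s = s[:15].rstrip('.')
--     if len(s) <= 2:
--         s = s + s[-1] * (3 - len(s))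
--     return s
-- ===== Notes on version B (the rewrite author's own statement) =====
-- stated objective: faster
-- what changed: Replaces A's in-place pop() filter loop and restarting recursive consecutive-dot collapse (plus branchy one-dot trims and an append-one-at-a-time pad loop) with a single left-to-right pass that filters and collapses dots on the fly, followed by stripping leading/trailing dots and a computed replicate pad.
import Mathlib
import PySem

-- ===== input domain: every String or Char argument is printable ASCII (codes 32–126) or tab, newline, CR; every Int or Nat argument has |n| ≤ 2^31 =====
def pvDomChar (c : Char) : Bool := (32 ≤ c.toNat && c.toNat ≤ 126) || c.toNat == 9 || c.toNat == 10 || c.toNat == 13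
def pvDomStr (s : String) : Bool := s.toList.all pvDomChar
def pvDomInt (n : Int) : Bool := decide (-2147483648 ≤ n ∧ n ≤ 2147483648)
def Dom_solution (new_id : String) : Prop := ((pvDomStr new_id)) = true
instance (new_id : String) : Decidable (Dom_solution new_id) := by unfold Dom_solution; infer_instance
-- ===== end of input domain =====

-- B replaces A's O(n^2) pop-based filter loop and restarting recursive dot collapse with a
-- single left-to-right pass plus a strip of boundary dots; equivalence of the return values is proved below.

-- ===== PORT A =====

-- character kept by A's while-loop: isalpha() or isdigit() or in ['-','_','.']
def pvKeepA (c : Char) : Bool :=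
  PySem.Chars.isalpha c || PySem.Chars.isdigit c || ['-', '_', '.'].contains c

-- A's `while a < len(new_lst): ... pop(a)` filter loop
def pvFiltLoop (lst : List Char) (a : Nat) : List Char :=
  if h : a < lst.length then
    if pvKeepA lst[a] then pvFiltLoop lst (a + 1)
    else pvFiltLoop (lst.eraseIdx a) a
  else lst
termination_by lst.length - a
decreasing_by
  · omega
  · simp [List.length_eraseIdx, h]; omega

-- A's recursive `dot`: scan for a consecutive-dot pair, pop the second, restart
def pvDotLoop (lst : List Char) (i : Nat) : List Char :=
  if h : i + 1 < lst.length then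
    if lst[i]'(by omega) = '.' ∧ lst[i + 1]'h = '.' then pvDotLoop (lst.eraseIdx (i + 1)) 0
    else pvDotLoop lst (i + 1)
  else lst
termination_by (lst.length, lst.length - i)
decreasing_by
  · exact Prod.Lex.left _ _ (by simp [List.length_eraseIdx, h]; omega)
  · exact Prod.Lex.right _ (by omega)

-- A's `while len(new_lst) < 3: new_lst.append(new_lst[-1])`
def pvPadLoop (l : List Char) : List Char :=
  if _h : l.length < 3 then
    match l.getLast? with
    | some c => pvPadLoop (l ++ [c])
    | none => l   -- unreachable in solution (list is nonempty there); Python would raise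
  else l
termination_by 3 - l.length
decreasing_by simp; omega

def solution (new_id : String) : String :=
  let l0 := (PySem.Str.lower new_id).toList
  let l1 := pvFiltLoop l0 0
  let l2 := pvDotLoop l1 0
  let l3 :=
    if 2 ≤ l2.length then
      let m := if l2.head? = some '.' then l2.tail else l2    -- pop(0)
      if m.getLast? = some '.' then m.dropLast else m          -- pop(-1)
    else if l2.length = 1 then
      if l2.head? = some '.' then l2.dropLast else l2          -- pop()
    else l2
  let l4 := if l3 = [] then ['a'] else l3
  let l5 :=
    if 16 ≤ l4.length then
      let t := l4.take 15
      if t.getLast? = some '.' then t.dropLast else t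
    else if l4.length ≤ 2 then pvPadLoop l4
    else l4
  String.mk l5

-- ===== PORT B =====

-- B's non-dot keep predicate: isalpha() or isdigit() or in '-_'
def pvKeepB (c : Char) : Bool :=
  PySem.Chars.isalpha c || PySem.Chars.isdigit c || "-_".toList.contains c

-- one step of B's single pass (filter + on-the-fly dot collapse)
def pvStepB (out : List Char) (c : Char) : List Char :=
  if pvKeepB c then out ++ [c]
  else if c = '.' ∧ (out = [] ∨ out.getLast? ≠ some '.') then out ++ [c]
  else out

def solution_alt (new_id : String) : String :=
  let out := (PySem.Str.lower new_id).toList.foldl pvStepB []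
  let s1 := PySem.Chars.stripChars out ['.']                    -- .strip('.')
  let s2 := if s1 = [] then ['a'] else s1
  let s3 :=
    if 16 ≤ s2.length then
      -- s[:15].rstrip('.'); hand port of rstrip('.'), exact: drop trailing '.' chars
      (((s2.take 15).reverse.dropWhile (fun c => ['.'].contains c)).reverse)
    else s2
  let s4 :=
    if s3.length ≤ 2 then
      match s3.getLast? with
      | some c => s3 ++ List.replicate (3 - s3.length) c        -- s + s[-1]*(3-len(s))
      | none => s3   -- unreachable (s3 is nonempty); Python would raise
    else s3
  String.mk s4

-- ===== PRECONDITION & SPEC =====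
def Spec_solution (new_id : String) (out : String) : Prop := out = solution_alt new_id
instance (new_id : String) (out : String) : Decidable (Spec_solution new_id out) := by unfold Spec_solution; infer_instance

-- ===== CLAIM (what is proved, stated in full; the proofs are below) =====
def Claim_equal_solution : Prop := ∀ (new_id : String), Dom_solution new_id → Spec_solution new_id (solution new_id)

-- ===== LEMMAS AND PROOFS =====

-- reference collapse of consecutive dots; p = "previous emitted char is a dot"
def pvCollapse (p : Bool) : List Char → List Char
  | [] => []
  | c :: t =>
    if c = '.' then (if p then pvCollapse true t else '.' :: pvCollapse true t)
    else c :: pvCollapse false t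

-- B's pass on the unfiltered list, in functional form
def pvGo (p : Bool) : List Char → List Char
  | [] => []
  | c :: t =>
    if pvKeepB c then c :: pvGo false t
    else if c = '.' then (if p then pvGo true t else '.' :: pvGo true t)
    else pvGo p t

-- no pair of consecutive dots among the first i+1 positions
def pvClean (i : Nat) (l : List Char) : Prop :=
  ∀ j, j < i → ¬(l[j]? = some '.' ∧ l[j + 1]? = some '.')

-- no consecutive dots anywhere
def pvNoDD (l : List Char) : Prop := l.IsChain (fun a b => ¬(a = '.' ∧ b = '.'))

-- pvKeepA = pvKeepB or dot
theorem pv_keepA_eq (c : Char) : pvKeepA c = (pvKeepB c || c == '.') := by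
  simp [pvKeepA, pvKeepB, Bool.or_assoc, beq_eq_decide]

theorem pv_keepB_dot : pvKeepB '.' = false := by decide

-- B's foldl in functional form
theorem pv_foldl_stepB (l : List Char) : ∀ acc : List Char,
    l.foldl pvStepB acc = acc ++ pvGo (decide (acc.getLast? = some '.')) l := by
  induction l with
  | nil => intro acc; simp [pvGo]
  | cons c t ih =>
    intro acc
    rw [List.foldl_cons, ih]
    by_cases hk : pvKeepB c = true
    · have hc : c ≠ '.' := by intro h; rw [h, pv_keepB_dot] at hk; exact absurd hk (by simp)
      simp [pvStepB, hk, pvGo, hc, List.getLast?_concat]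
    · by_cases hc : c = '.'
      · subst hc
        by_cases hp : acc.getLast? = some '.'
        · have hne : acc ≠ [] := by intro h; simp [h] at hp
          simp [pvStepB, hk, hp, hne, pvGo]
        · simp [pvStepB, hk, hp, pvGo, List.getLast?_concat]
      · simp [pvStepB, hk, hc, pvGo]

-- B's pass = collapse of A's filter
theorem pv_go_eq (l : List Char) : ∀ p, pvGo p l = pvCollapse p (l.filter pvKeepA) := by
  induction l with
  | nil => intro p; simp [pvGo, pvCollapse]
  | cons c t ih =>
    intro p
    by_cases hk : pvKeepB c = true
    · have hc : c ≠ '.' := by intro h; rw [h, pv_keepB_dot] at hk; exact absurd hk (by simp)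
      have hA : pvKeepA c = true := by rw [pv_keepA_eq, hk]; simp
      simp [pvGo, hk, List.filter_cons, hA, pvCollapse, hc, ih]
    · by_cases hc : c = '.'
      · subst hc
        have hA : pvKeepA '.' = true := by rw [pv_keepA_eq]; simp
        simp [pvGo, hk, List.filter_cons, hA, pvCollapse, ih]
      · have hkf : pvKeepB c = false := by revert hk; cases pvKeepB c <;> simp
        have hA : pvKeepA c = false := by rw [pv_keepA_eq, hkf]; simp [hc]
        simp [pvGo, hkf, hc, List.filter_cons, hA, ih]

-- A's filter loop = List.filter
theorem pv_filtLoop_eq (l : List Char) (a : Nat) :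
    pvFiltLoop l a = l.take a ++ (l.drop a).filter pvKeepA := by
  induction l, a using pvFiltLoop.induct with
  | case1 l a h hk ih =>
    rw [pvFiltLoop]
    simp only [dif_pos h, if_pos hk]
    rw [ih, List.drop_eq_getElem_cons h, List.filter_cons, hk,
      List.take_add_one, List.getElem?_eq_getElem h]
    simp only [Option.toList_some, List.append_assoc, List.cons_append, List.nil_append]
    simp
  | case2 l a h hk ih =>
    rw [pvFiltLoop]
    simp only [dif_pos h, if_neg hk]
    rw [ih, List.eraseIdx_eq_take_drop_succ]
    have hlt : (l.take a).length = a := by simp; omega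
    rw [List.take_append_of_le_length (by omega), List.take_take, min_self,
      List.drop_append_of_le_length (by omega), List.drop_of_length_le (by omega),
      List.nil_append, List.drop_eq_getElem_cons h, List.filter_cons]
    have hkf : pvKeepA l[a] = false := by revert hk; cases pvKeepA l[a] <;> simp
    rw [hkf]
    simp
  | case3 l a h =>
    rw [pvFiltLoop]
    simp only [dif_neg h]
    rw [List.take_of_length_le (by omega), List.drop_of_length_le (by omega)]
    simp

-- collapse ignores p when the head is not a dot
theorem pv_collapse_true_eq (l : List Char) (h : l.head? ≠ some '.') :
    pvCollapse true l = pvCollapse false l := by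
  cases l with
  | nil => rfl
  | cons c t =>
    have hc : c ≠ '.' := by intro hh; exact h (by simp [hh])
    simp [pvCollapse, hc]

-- collapse skips a clean prefix
theorem pv_collapse_split (i : Nat) : ∀ l, pvClean i l →
    pvCollapse false l = l.take i ++ pvCollapse false (l.drop i) := by
  induction i with
  | zero => intro l _; simp
  | succ i ih =>
    intro l hcl
    cases l with
    | nil => simp
    | cons c t =>
      have hct : pvClean i t := by
        intro j hj
        have := hcl (j + 1) (by omega)
        simpa using this
      by_cases hc : c = '.'
      · subst hc
        have h0 := hcl 0 (by omega)
        simp at h0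
        have : pvCollapse false ('.' :: t) = '.' :: pvCollapse true t := by simp [pvCollapse]
        rw [this, pv_collapse_true_eq t (by rw [List.head?_eq_getElem?]; simp [h0]), ih t hct]
        simp
      · have : pvCollapse false (c :: t) = c :: pvCollapse false t := by simp [pvCollapse, hc]
        rw [this, ih t hct]
        simp

-- A's dot-collapse loop computes pvCollapse
theorem pv_dotLoop_eq : ∀ (l : List Char) (i : Nat), pvClean i l →
    pvDotLoop l i = l.take i ++ pvCollapse false (l.drop i) := by
  intro l i
  induction l, i using pvDotLoop.induct with
  | case1 l i h hd ih =>
    intro hcl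
    obtain ⟨hd1, hd2⟩ := hd
    rw [pvDotLoop]
    simp only [dif_pos h, if_pos (And.intro hd1 hd2)]
    rw [ih (by intro j hj; omega)]
    simp only [List.take_zero, List.drop_zero, List.nil_append]
    have he : l.eraseIdx (i + 1) = l.take (i + 1) ++ l.drop (i + 2) :=
      List.eraseIdx_eq_take_drop_succ ..
    have hlt : (l.take (i + 1)).length = i + 1 := by simp; omega
    have hcle : pvClean i (l.eraseIdx (i + 1)) := by
      intro j hj
      rw [he, List.getElem?_append_left (by omega), List.getElem?_append_left (by omega),
        List.getElem?_take_of_lt (by omega), List.getElem?_take_of_lt (by omega)]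
      exact hcl j hj
    rw [pv_collapse_split i _ hcle, he]
    rw [List.take_append_of_le_length (by omega), List.take_take, show min i (i+1) = i from by omega,
      List.drop_append_of_le_length (by omega), List.drop_take,
      List.drop_eq_getElem_cons (show i < l.length by omega)]
    have h1 : i + 1 - i = 1 := by omega
    rw [h1, List.take_succ_cons, List.take_zero, hd1]
    have h2 : l.drop (i + 1) = l[i + 1]'h :: l.drop (i + 2) := List.drop_eq_getElem_cons h
    rw [h2, hd2]
    simp [pvCollapse]
  | case2 l i h hd ih =>
    intro hcl
    rw [pvDotLoop]
    simp only [dif_pos h, if_neg hd]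
    have hcl' : pvClean (i + 1) l := by
      intro j hj
      by_cases hji : j < i
      · exact hcl j hji
      · have hj' : j = i := by omega
        subst hj'
        rw [List.getElem?_eq_getElem (by omega), List.getElem?_eq_getElem h]
        intro hcon
        exact hd ⟨by simpa using hcon.1, by simpa using hcon.2⟩
    rw [ih hcl']
    have hdropi : l.drop i = l[i]'(by omega) :: l.drop (i + 1) := List.drop_eq_getElem_cons (by omega)
    have htk : l.take (i + 1) = l.take i ++ [l[i]'(by omega)] := by
      rw [List.take_add_one, List.getElem?_eq_getElem (by omega)]; rfl
    by_cases hci : l[i]'(by omega) = '.'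
    · have hci1 : l[i + 1]'h ≠ '.' := fun hh => hd ⟨hci, hh⟩
      have hdrop1 : l.drop (i + 1) = l[i + 1]'h :: l.drop (i + 2) := List.drop_eq_getElem_cons h
      rw [htk, hdropi, hci]
      have : pvCollapse false ('.' :: l.drop (i + 1)) = '.' :: pvCollapse true (l.drop (i + 1)) := by
        simp [pvCollapse]
      rw [this, pv_collapse_true_eq _
        (by rw [hdrop1]; simp only [List.head?_cons, ne_eq, Option.some.injEq]; exact hci1)]
      simp only [List.append_assoc, List.cons_append, List.nil_append]
    · rw [htk, hdropi]
      have : pvCollapse false (l[i]'(by omega) :: l.drop (i + 1))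
          = l[i]'(by omega) :: pvCollapse false (l.drop (i + 1)) := by simp [pvCollapse, hci]
      rw [this]
      simp only [List.append_assoc, List.cons_append, List.nil_append]
  | case3 l i h =>
    intro _
    rw [pvDotLoop]
    simp only [dif_neg h]
    have hco : pvCollapse false (l.drop i) = l.drop i := by
      rcases hd : l.drop i with _ | ⟨c, t⟩
      · simp [pvCollapse]
      · have : t = [] := by
          have := congrArg List.length hd
          simp at this
          have : t.length = 0 := by omega
          simpa [List.length_eq_zero_iff] using this
        subst this
        by_cases hc : c = '.' <;> simp [pvCollapse, hc]
    rw [hco, List.take_append_drop]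

-- the collapsed list has no consecutive dots (and starts with a non-dot when p = true)
theorem pv_collapse_noDD : ∀ (l : List Char) (p : Bool),
    pvNoDD (pvCollapse p l) ∧ (p = true → (pvCollapse p l).head? ≠ some '.') := by
  intro l
  induction l with
  | nil => intro p; exact ⟨by simp [pvCollapse, pvNoDD], by simp [pvCollapse]⟩
  | cons c t ih =>
    intro p
    by_cases hc : c = '.'
    · subst hc
      cases p with
      | true =>
        have : pvCollapse true ('.' :: t) = pvCollapse true t := by simp [pvCollapse]
        rw [this]
        exact ih true
      | false =>
        have heq : pvCollapse false ('.' :: t) = '.' :: pvCollapse true t := by simp [pvCollapse]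
        obtain ⟨h1, h2⟩ := ih true
        refine ⟨?_, by simp⟩
        rw [heq]
        unfold pvNoDD at h1 ⊢
        rw [List.isChain_cons]
        refine ⟨?_, h1⟩
        intro y hy hcon
        exact h2 rfl (by rw [hy, hcon.2])
    · have heq : pvCollapse p (c :: t) = c :: pvCollapse false t := by simp [pvCollapse, hc]
      obtain ⟨h1, _⟩ := ih false
      refine ⟨?_, ?_⟩
      · rw [heq]
        unfold pvNoDD at h1 ⊢
        rw [List.isChain_cons]
        exact ⟨fun y _ hcon => hc hcon.1, h1⟩
      · intro _
        rw [heq]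
        simp [hc]

-- dropWhile '.' on a no-double-dot list removes at most the head
theorem pv_dropWhile_noDD (s : List Char) (h : pvNoDD s) :
    s.dropWhile (fun c => (['.'] : List Char).contains c)
      = if s.head? = some '.' then s.tail else s := by
  cases s with
  | nil => simp
  | cons c t =>
    by_cases hc : c = '.'
    · subst hc
      rw [List.dropWhile_cons_of_pos (by simp)]
      cases t with
      | nil => simp
      | cons d t' =>
        have hd : d ≠ '.' := by
          unfold pvNoDD at h
          have := (List.isChain_cons_cons.mp h).1
          intro hh
          exact this ⟨rfl, hh⟩
        rw [List.dropWhile_cons_of_neg (by simp [hd])]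
        simp
    · rw [List.dropWhile_cons_of_neg (by simp [hc])]
      simp [hc]

-- right strip '.' on a no-double-dot list removes at most the last char
theorem pv_noDD_reverse (s : List Char) (h : pvNoDD s) : pvNoDD s.reverse := by
  unfold pvNoDD at h ⊢
  rw [List.isChain_reverse]
  have hR : (fun a b : Char => ¬(b = '.' ∧ a = '.')) = fun a b : Char => ¬(a = '.' ∧ b = '.') := by
    funext a b
    apply propext
    constructor <;> (intro hh hcon; exact hh ⟨hcon.2, hcon.1⟩)
  rw [hR]
  exact h

theorem pv_rstrip_noDD (s : List Char) (h : pvNoDD s) :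
    (s.reverse.dropWhile (fun c => (['.'] : List Char).contains c)).reverse
      = if s.getLast? = some '.' then s.dropLast else s := by
  rw [pv_dropWhile_noDD s.reverse (pv_noDD_reverse s h), List.head?_reverse]
  by_cases hl : s.getLast? = some '.'
  · rw [if_pos hl, if_pos hl, List.tail_reverse, List.reverse_reverse]
  · rw [if_neg hl, if_neg hl, List.reverse_reverse]

-- noDD is preserved by tail / dropLast / take
theorem pv_noDD_tail (s : List Char) (h : pvNoDD s) : pvNoDD s.tail := List.IsChain.tail h
theorem pv_noDD_take (s : List Char) (n : Nat) (h : pvNoDD s) : pvNoDD (s.take n) :=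
  List.IsChain.prefix h (List.take_prefix n s)

-- A's branchy single-dot trim = strip('.') on a no-double-dot list
theorem pv_trim_eq (s : List Char) (h : pvNoDD s) :
    (if 2 ≤ s.length then
        (let m := if s.head? = some '.' then s.tail else s
         if m.getLast? = some '.' then m.dropLast else m)
      else if s.length = 1 then (if s.head? = some '.' then s.dropLast else s) else s)
    = PySem.Chars.stripChars s ['.'] := by
  have hnm : pvNoDD (if s.head? = some '.' then s.tail else s) := by
    split
    · exact pv_noDD_tail s h
    · exact h
  rw [show PySem.Chars.stripChars s ['.']
      = ((((s.dropWhile (fun c => (['.'] : List Char).contains c)).reverse).dropWhile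
          (fun c => (['.'] : List Char).contains c)).reverse) from rfl]
  rw [pv_dropWhile_noDD s h, pv_rstrip_noDD _ hnm]
  by_cases h2 : 2 ≤ s.length
  · simp only [if_pos h2]
  · rcases s with _ | ⟨a, _ | ⟨b, t⟩⟩
    · simp
    · by_cases ha : a = '.'
      · simp [ha]
      · simp [ha]
    · exact absurd (by simp : 2 ≤ (a :: b :: t).length) h2

-- the padding loop appends copies of the last element up to length 3
theorem pv_padLoop_eq (l : List Char) (c : Char) (hc : l.getLast? = some c)
    (hlen : l.length ≤ 2) :
    pvPadLoop l = l ++ List.replicate (3 - l.length) c := by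
  rcases l with _ | ⟨a, _ | ⟨b, _ | ⟨d, t⟩⟩⟩
  · simp at hc
  · simp at hc
    subst hc
    rw [pvPadLoop.eq_def]
    norm_num
    rw [pvPadLoop.eq_def]
    norm_num
    rw [pvPadLoop.eq_def]
    norm_num
    simp [List.replicate_succ]
  · simp at hc
    subst hc
    rw [pvPadLoop.eq_def]
    norm_num
    rw [pvPadLoop.eq_def]
    norm_num
  · simp at hlen

-- ['a'] has no double dots
theorem pv_noDD_singleton (c : Char) : pvNoDD [c] := by simp [pvNoDD]

-- strip('.') preserves the no-double-dot property
theorem pv_noDD_strip (s : List Char) (h : pvNoDD s) :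
    pvNoDD (PySem.Chars.stripChars s ['.']) := by
  rw [show PySem.Chars.stripChars s ['.']
      = ((((s.dropWhile (fun c => (['.'] : List Char).contains c)).reverse).dropWhile
          (fun c => (['.'] : List Char).contains c)).reverse) from rfl]
  apply pv_noDD_reverse
  apply List.IsChain.suffix _ (List.dropWhile_suffix _)
  apply pv_noDD_reverse
  exact List.IsChain.suffix h (List.dropWhile_suffix _)

-- last stage: A's truncate-or-pad = B's rstrip-then-pad, on a nonempty no-double-dot list
theorem pv_finish_eq (v : List Char) (hv : pvNoDD v) (hne : v ≠ []) :
    (if 16 ≤ v.length then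
       (if (v.take 15).getLast? = some '.' then (v.take 15).dropLast else v.take 15)
     else if v.length ≤ 2 then pvPadLoop v else v)
    = (let s3 := if 16 ≤ v.length then
          ((v.take 15).reverse.dropWhile (fun c => (['.'] : List Char).contains c)).reverse
        else v
       if s3.length ≤ 2 then
         (match s3.getLast? with
          | some c => s3 ++ List.replicate (3 - s3.length) c
          | none => s3)
       else s3) := by
  by_cases h16 : 16 ≤ v.length
  · rw [pv_rstrip_noDD (v.take 15) (pv_noDD_take v 15 hv)]
    simp only [if_pos h16]
    have hlt : (v.take 15).length = 15 := by simp; omega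
    by_cases hl : (v.take 15).getLast? = some '.'
    · simp only [if_pos hl]
      rw [if_neg (by simp [hlt])]
    · simp only [if_neg hl]
      rw [if_neg (by omega)]
  · simp only [if_neg h16]
    by_cases h2 : v.length ≤ 2
    · simp only [if_pos h2]
      obtain ⟨c, hc⟩ := Option.isSome_iff_exists.mp (List.getLast?_isSome.mpr hne)
      rw [pv_padLoop_eq v c hc h2, hc]
    · simp only [if_neg h2]

theorem solution_spec : Claim_equal_solution := by
  unfold Claim_equal_solution Spec_solution
  intro new_id _
  unfold solution solution_alt
  have hA : pvDotLoop (pvFiltLoop (PySem.Str.lower new_id).toList 0) 0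
      = pvCollapse false ((PySem.Str.lower new_id).toList.filter pvKeepA) := by
    rw [pv_filtLoop_eq]
    simp only [List.take_zero, List.drop_zero, List.nil_append]
    rw [pv_dotLoop_eq _ 0 (by intro j hj; omega)]
    simp
  have hB : (PySem.Str.lower new_id).toList.foldl pvStepB []
      = pvCollapse false ((PySem.Str.lower new_id).toList.filter pvKeepA) := by
    rw [pv_foldl_stepB]
    simp only [List.getLast?_nil, List.nil_append]
    rw [pv_go_eq]
    congr 1
  set s := pvCollapse false ((PySem.Str.lower new_id).toList.filter pvKeepA) with hsdef
  have hs : pvNoDD s := (pv_collapse_noDD _ _).1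
  simp only [hA, hB]
  rw [pv_trim_eq s hs]
  have hu : pvNoDD (PySem.Chars.stripChars s ['.']) := pv_noDD_strip s hs
  set u := PySem.Chars.stripChars s ['.'] with hudef
  have hv : pvNoDD (if u = [] then ['a'] else u) := by
    split
    · exact pv_noDD_singleton 'a'
    · exact hu
  have hvne : (if u = [] then ['a'] else u) ≠ [] := by
    split
    · simp
    · assumption
  rw [pv_finish_eq _ hv hvne]
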